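-- pv_equiv track=rewrite | github.com/PixelShake92/TerranigmaAP | terranigma_randomizer/randomizers/integration.py | get_evolution_group
-- ===== SOURCE A (Python) =====
-- def get_evolution_group(shop_id):
--     """Get the evolution group for a shop ID"""
--     # Inline shop evolution groups data
--     SHOP_EVOLUTION_GROUPS = {
--         'LUMINA': [
--             {'id': 2, 'stage': 1, 'location': 'Lumina (stage 1)', 'fileOffset': 0x19D077},
--             {'id': 3, 'stage': 2, 'location': 'Lumina (stage 2/3)', 'fileOffset': 0x19D084}
--         ],
--         'SANCTUAR': [
--             {'id': 6, 'stage': 1, 'location': 'Sanctuar (pre-birds)', 'fileOffset': 0x19D0AE},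
--             {'id': 5, 'stage': 2, 'location': 'Sanctuar (birds)', 'fileOffset': 0x19D09D}
--         ],
--         'LOIRE': [
--             {'id': 13, 'stage': 1, 'location': 'Loire - Shop', 'fileOffset': 0x19D125},
--             {'id': 14, 'stage': 2, 'location': 'Loire - Shop Weapons', 'fileOffset': 0x19D136},
--             {'id': 17, 'stage': 3, 'location': 'Loire - Merchant', 'fileOffset': 0x19D175},
--             {'id': 19, 'stage': 3, 'location': 'Loire - Merchant', 'fileOffset': 0x19D182}
--         ],
--         'FREEDOM_INN': [
--             {'id': 18, 'stage': 1, 'location': 'Freedom - Inn - Merchant', 'fileOffset': 0x19D2A2},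
--             {'id': 21, 'stage': 2, 'location': 'Freedom - Inn - Merchant', 'fileOffset': 0x19D19C},
--             {'id': 22, 'stage': 2, 'location': 'Freedom - Inn - Merchant', 'fileOffset': 0x19D1B1}
--         ],
--         'FREEDOM_MAIN': [
--             {'id': 24, 'stage': 2, 'location': 'Freedom - Weapons', 'fileOffset': 0x19D1CA},
--             {'id': 25, 'stage': 2, 'location': 'Freedom - Armor (Stage 2)', 'fileOffset': 0x19D1D7},
--             {'id': 27, 'stage': 3, 'location': 'Freedom - Weapons (Stage 3)', 'fileOffset': 0x19D1E4},
--             {'id': 28, 'stage': 3, 'location': 'Freedom - Armor', 'fileOffset': 0x19D1F5}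
--         ],
--         'LITZ': [
--             {'id': 30, 'stage': 1, 'location': 'Litz - Merchant', 'fileOffset': 0x19D206},
--             {'id': 32, 'stage': 2, 'location': 'Litz - Merchant (Stage Final)', 'fileOffset': 0x19D217}
--         ],
--         'SUNCOAST': [
--             {'id': 36, 'stage': 1, 'location': 'Suncoast- Left Merchant', 'fileOffset': 0x19D26F},
--             {'id': 37, 'stage': 1, 'location': 'Suncoast- Right Merchant', 'fileOffset': 0x19D2A2},
--             {'id': 38, 'stage': 2, 'location': 'Suncoast Merchant', 'fileOffset': 0x19D2A2},
--             {'id': 39, 'stage': 2, 'location': 'Suncoast - Merchant', 'fileOffset': 0x19D278}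
--         ],
--         'NIRLAKE': [
--             {'id': 15, 'stage': 1, 'location': 'Nirlake - House', 'fileOffset': 0x19D147},
--             {'id': 16, 'stage': 2, 'location': '1st Ave. - Merchant', 'fileOffset': 0x19D15C},
--             {'id': 42, 'stage': 3, 'location': 'Nirlake - Hotel - Room 2', 'fileOffset': 0x19D262}
--         ]
--     }
--
--     for group_name, shops in SHOP_EVOLUTION_GROUPS.items():
--         for shop in shops:
--             if shop['id'] == shop_id:
--                 return group_name, shop['stage']
--     return None, None
-- ===== SOURCE B (Python) =====
-- # Flat precomputed index: one dict lookup instead of scanning nested group lists.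
-- _EVOLUTION_INDEX = {
--     2: ('LUMINA', 1), 3: ('LUMINA', 2),
--     6: ('SANCTUAR', 1), 5: ('SANCTUAR', 2),
--     13: ('LOIRE', 1), 14: ('LOIRE', 2), 17: ('LOIRE', 3), 19: ('LOIRE', 3),
--     18: ('FREEDOM_INN', 1), 21: ('FREEDOM_INN', 2), 22: ('FREEDOM_INN', 2),
--     24: ('FREEDOM_MAIN', 2), 25: ('FREEDOM_MAIN', 2), 27: ('FREEDOM_MAIN', 3), 28: ('FREEDOM_MAIN', 3),
--     30: ('LITZ', 1), 32: ('LITZ', 2),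
--     36: ('SUNCOAST', 1), 37: ('SUNCOAST', 1), 38: ('SUNCOAST', 2), 39: ('SUNCOAST', 2),
--     15: ('NIRLAKE', 1), 16: ('NIRLAKE', 2), 42: ('NIRLAKE', 3),
-- }
--
-- def get_evolution_group(shop_id):
--     """Get the evolution group for a shop ID"""
--     group, stage = _EVOLUTION_INDEX.get(shop_id, (None, None))
--     return group, stage
-- ===== Notes on version B (the rewrite author's own statement) =====
-- stated objective: simpler
-- what changed: Replaced the nested double loop over the grouped table with a single precomputed flat dict mapping shop id to (group, stage) and one .get lookup.
import Mathlib
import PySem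

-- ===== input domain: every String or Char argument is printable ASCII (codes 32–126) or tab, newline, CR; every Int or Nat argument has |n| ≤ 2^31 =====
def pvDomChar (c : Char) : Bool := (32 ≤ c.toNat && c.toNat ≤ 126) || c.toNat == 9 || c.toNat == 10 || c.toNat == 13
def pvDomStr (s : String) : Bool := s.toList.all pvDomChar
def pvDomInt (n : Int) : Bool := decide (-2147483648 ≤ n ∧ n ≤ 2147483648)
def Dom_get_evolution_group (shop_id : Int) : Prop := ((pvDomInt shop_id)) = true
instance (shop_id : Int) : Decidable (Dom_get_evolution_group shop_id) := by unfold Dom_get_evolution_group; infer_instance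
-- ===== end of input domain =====

-- B replaces A's nested double loop over the grouped table with one precomputed flat
-- shop_id → (group, stage) index and a single dict lookup (objective: simpler).

-- ===== PORT A =====
-- each shop entry: (id, stage, location, fileOffset), as in A's dict literals
def pvShopEvolutionGroups : List (String × List (Int × Int × String × Int)) :=
  [("LUMINA", [(2, 1, "Lumina (stage 1)", 0x19D077), (3, 2, "Lumina (stage 2/3)", 0x19D084)]),
   ("SANCTUAR", [(6, 1, "Sanctuar (pre-birds)", 0x19D0AE), (5, 2, "Sanctuar (birds)", 0x19D09D)]),
   ("LOIRE", [(13, 1, "Loire - Shop", 0x19D125), (14, 2, "Loire - Shop Weapons", 0x19D136),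
              (17, 3, "Loire - Merchant", 0x19D175), (19, 3, "Loire - Merchant", 0x19D182)]),
   ("FREEDOM_INN", [(18, 1, "Freedom - Inn - Merchant", 0x19D2A2), (21, 2, "Freedom - Inn - Merchant", 0x19D19C),
                    (22, 2, "Freedom - Inn - Merchant", 0x19D1B1)]),
   ("FREEDOM_MAIN", [(24, 2, "Freedom - Weapons", 0x19D1CA), (25, 2, "Freedom - Armor (Stage 2)", 0x19D1D7),
                     (27, 3, "Freedom - Weapons (Stage 3)", 0x19D1E4), (28, 3, "Freedom - Armor", 0x19D1F5)]),
   ("LITZ", [(30, 1, "Litz - Merchant", 0x19D206), (32, 2, "Litz - Merchant (Stage Final)", 0x19D217)]),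
   ("SUNCOAST", [(36, 1, "Suncoast- Left Merchant", 0x19D26F), (37, 1, "Suncoast- Right Merchant", 0x19D2A2),
                 (38, 2, "Suncoast Merchant", 0x19D2A2), (39, 2, "Suncoast - Merchant", 0x19D278)]),
   ("NIRLAKE", [(15, 1, "Nirlake - House", 0x19D147), (16, 2, "1st Ave. - Merchant", 0x19D15C),
                (42, 3, "Nirlake - Hotel - Room 2", 0x19D262)])]

-- inner 'for shop in shops' loop with early return
def pvScanShops (group_name : String) (shop_id : Int) :
    List (Int × Int × String × Int) → Option (Option String × Option Int)
  | [] => none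
  | s :: rest =>
    if s.1 == shop_id then some (some group_name, some s.2.1)
    else pvScanShops group_name shop_id rest

-- outer 'for group_name, shops in ….items()' loop
def pvScanGroups (shop_id : Int) :
    List (String × List (Int × Int × String × Int)) → Option String × Option Int
  | [] => (none, none)
  | (name, shops) :: rest =>
    match pvScanShops name shop_id shops with
    | some r => r
    | none => pvScanGroups shop_id rest

def get_evolution_group (shop_id : Int) : Option String × Option Int :=
  pvScanGroups shop_id pvShopEvolutionGroups

-- ===== PORT B =====
def pvEvolutionIndex : PySem.Dict Int (String × Int) :=
  PySem.Dict.mk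
  [(2, ("LUMINA", 1)), (3, ("LUMINA", 2)),
   (6, ("SANCTUAR", 1)), (5, ("SANCTUAR", 2)),
   (13, ("LOIRE", 1)), (14, ("LOIRE", 2)), (17, ("LOIRE", 3)), (19, ("LOIRE", 3)),
   (18, ("FREEDOM_INN", 1)), (21, ("FREEDOM_INN", 2)), (22, ("FREEDOM_INN", 2)),
   (24, ("FREEDOM_MAIN", 2)), (25, ("FREEDOM_MAIN", 2)), (27, ("FREEDOM_MAIN", 3)), (28, ("FREEDOM_MAIN", 3)),
   (30, ("LITZ", 1)), (32, ("LITZ", 2)),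
   (36, ("SUNCOAST", 1)), (37, ("SUNCOAST", 1)), (38, ("SUNCOAST", 2)), (39, ("SUNCOAST", 2)),
   (15, ("NIRLAKE", 1)), (16, ("NIRLAKE", 2)), (42, ("NIRLAKE", 3))]

def get_evolution_group_alt (shop_id : Int) : Option String × Option Int :=
  match PySem.Dict.get? pvEvolutionIndex shop_id with
  | some (group, stage) => (some group, some stage)
  | none => (none, none)

-- ===== PRECONDITION & SPEC =====
def Spec_get_evolution_group (shop_id : Int) (out : Option String × Option Int) : Prop := out = get_evolution_group_alt shop_id
instance (shop_id : Int) (out : Option String × Option Int) : Decidable (Spec_get_evolution_group shop_id out) := by unfold Spec_get_evolution_group; infer_instance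

-- ===== CLAIM (what is proved, stated in full; the proofs are below) =====
def Claim_equal_get_evolution_group : Prop := ∀ (shop_id : Int), Dom_get_evolution_group shop_id → Spec_get_evolution_group shop_id (get_evolution_group shop_id)

-- ===== LEMMAS AND PROOFS =====

-- ===== VERDICT (by name: the statement is the Claim_ definition above) =====
theorem get_evolution_group_spec : Claim_equal_get_evolution_group := by
  intro shop_id _
  unfold Spec_get_evolution_group get_evolution_group get_evolution_group_alt
  by_cases h : shop_id = 2 ∨ shop_id = 3 ∨ shop_id = 6 ∨ shop_id = 5 ∨ shop_id = 13 ∨ shop_id = 14 ∨ shop_id = 17 ∨ shop_id = 19 ∨ shop_id = 18 ∨ shop_id = 21 ∨ shop_id = 22 ∨ shop_id = 24 ∨ shop_id = 25 ∨ shop_id = 27 ∨ shop_id = 28 ∨ shop_id = 30 ∨ shop_id = 32 ∨ shop_id = 36 ∨ shop_id = 37 ∨ shop_id = 38 ∨ shop_id = 39 ∨ shop_id = 15 ∨ shop_id = 16 ∨ shop_id = 42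
  · rcases h with rfl|rfl|rfl|rfl|rfl|rfl|rfl|rfl|rfl|rfl|rfl|rfl|rfl|rfl|rfl|rfl|rfl|rfl|rfl|rfl|rfl|rfl|rfl|rfl <;> rfl
  · push_neg at h
    obtain ⟨h0,h1,h2,h3,h4,h5,h6,h7,h8,h9,h10,h11,h12,h13,h14,h15,h16,h17,h18,h19,h20,h21,h22,h23⟩ := h
    simp [pvScanGroups, pvScanShops, pvShopEvolutionGroups, pvEvolutionIndex,
      PySem.Dict.get?, Ne.symm h0, Ne.symm h1, Ne.symm h2, Ne.symm h3, Ne.symm h4, Ne.symm h5, Ne.symm h6, Ne.symm h7, Ne.symm h8, Ne.symm h9, Ne.symm h10, Ne.symm h11, Ne.symm h12, Ne.symm h13, Ne.symm h14, Ne.symm h15, Ne.symm h16, Ne.symm h17, Ne.symm h18, Ne.symm h19, Ne.symm h20, Ne.symm h21, Ne.symm h22, Ne.symm h23]
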